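-- pv_equiv track=rewrite | github.com/hyeinkim1305/Algorithm | Programmers/Level2/Programmers_Level2_후보키.py | solution
-- ===== SOURCE A (Python) =====
-- from itertools import combinations
--
-- def solution(relation):
--     r = len(relation[0])
--
--     # 경우의 수 조합 구하기
--     candidate = []
--     for i in range(1, r + 1):
--         candidate.extend(combinations(range(r), i))
--
--     # 유일성 판단 - set에 넣어서 중복 제거하고 비교
--     mini = []
--     for c in candidate:
--         valid = set()
--         for r in relation:
--             temp = ''
--             for i in c:
--                 temp += r[i]
--             valid.add(temp)
--         if len(valid) == len(relation):
--             mini.append(c)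
--
--     # 최소성 판단
--     ans = set(mini)
--     for i in range(len(mini)):
--         for j in range(i + 1, len(mini)):
--             if len(mini[i]) == len(set(mini[i]) & set(mini[j])):
--                 ans.discard(mini[j])
--
--     return len(ans)
-- ===== SOURCE B (Python) =====
-- from itertools import combinations
--
-- def solution(relation):
--     n = len(relation)
--     r = len(relation[0])
--     minimal = []
--     for size in range(1, r + 1):
--         for cols in combinations(range(r), size):
--             if any(all(x in cols for x in m) for m in minimal):
--                 continue
--             if len({''.join(row[i] for i in cols) for row in relation}) == n:
--                 minimal.append(cols)
--     return len(minimal)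
-- ===== Notes on version B (the rewrite author's own statement) =====
-- stated objective: faster
-- what changed: B fuses A's two phases (collect every unique column subset, then a pairwise O(m^2) superset-discarding sweep) into one incremental pass over the size-ordered subsets that maintains the confirmed minimal keys and skips the per-row uniqueness projection for any subset containing an already-found key.
import Mathlib
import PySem

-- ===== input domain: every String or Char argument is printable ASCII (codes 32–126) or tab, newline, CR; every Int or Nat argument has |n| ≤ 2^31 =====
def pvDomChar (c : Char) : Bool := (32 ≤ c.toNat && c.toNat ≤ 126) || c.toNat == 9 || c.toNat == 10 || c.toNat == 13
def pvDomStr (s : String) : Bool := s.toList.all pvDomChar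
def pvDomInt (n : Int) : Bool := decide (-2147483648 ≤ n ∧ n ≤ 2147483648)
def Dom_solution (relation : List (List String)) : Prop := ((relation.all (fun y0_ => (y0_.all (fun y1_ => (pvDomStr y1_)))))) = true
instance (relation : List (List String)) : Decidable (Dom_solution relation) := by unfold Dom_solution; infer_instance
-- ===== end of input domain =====

-- B fuses A's two phases (collect all unique column sets, then a pairwise O(m^2) minimality sweep)
-- into one incremental pass over the size-ordered subsets that maintains the confirmed minimal keys,
-- skipping the expensive uniqueness test on every superset of an already-found key.

-- ===== PORT A =====
def solution (relation : List (List String)) : Int :=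
  let r : Int := ((PySem.List.pyGetD relation 0 []).length : Int)   -- relation[0]; Pre_ excludes the IndexError cases
  let candidate : List (List Int) :=
    (PySem.List.pyRange 1 (r + 1) 1).foldl
      (fun cand i => cand ++ PySem.List.combinations (PySem.List.pyRange 0 r 1) i.toNat) []
  let mini : List (List Int) :=
    candidate.foldl (fun mini c =>
      let valid : PySem.Set String :=
        relation.foldl (fun valid row =>
          PySem.Set.add valid (c.foldl (fun temp i => temp ++ PySem.List.pyGetD row i "") "")) PySem.Set.empty
      if PySem.Set.len valid == (relation.length : Int) then mini ++ [c] else mini) []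
  let ans : PySem.Set (List Int) :=
    (PySem.List.pyRange 0 (mini.length : Int) 1).foldl (fun ans i =>
      (PySem.List.pyRange (i + 1) (mini.length : Int) 1).foldl (fun ans j =>
        if (((PySem.List.pyGetD mini i []).length : Int) ==
            PySem.Set.len (PySem.Set.inter (PySem.Set.ofList (PySem.List.pyGetD mini i []))
                                           (PySem.Set.ofList (PySem.List.pyGetD mini j [])))) then
          PySem.Set.discard ans (PySem.List.pyGetD mini j [])
        else ans) ans) (PySem.Set.ofList mini)
  PySem.Set.len ans

-- ===== PORT B =====
def solution_alt (relation : List (List String)) : Int :=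
  let n : Int := (relation.length : Int)
  let r : Int := ((PySem.List.pyGetD relation 0 []).length : Int)   -- relation[0]; Pre_ excludes the IndexError cases
  let minimal : List (List Int) :=
    (PySem.List.pyRange 1 (r + 1) 1).foldl (fun minimal size =>
      (PySem.List.combinations (PySem.List.pyRange 0 r 1) size.toNat).foldl (fun minimal cols =>
        if minimal.any (fun m => m.all (fun x => cols.contains x)) then minimal
        else if PySem.Set.len (PySem.Set.ofList (relation.map (fun row =>
                   PySem.Str.join "" (cols.map (fun i => PySem.List.pyGetD row i ""))))) == n then
          minimal ++ [cols]
        else minimal) minimal) []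
  (minimal.length : Int)

-- ===== PRECONDITION & SPEC =====
-- Pre_ excludes exactly the inputs on which the Python A raises IndexError: the empty relation
-- (relation[0]) and ragged relations where some row is shorter than row 0 (r[i] out of range).
def Pre_solution (relation : List (List String)) : Prop :=
  relation ≠ [] ∧ ∀ row ∈ relation, (relation.headD []).length ≤ row.length
instance (relation : List (List String)) : Decidable (Pre_solution relation) := by
  unfold Pre_solution; infer_instance
def pvWitness_solution : List (List String) := [["a", "b"], ["c", "b"]]

def Spec_solution (relation : List (List String)) (out : Int) : Prop := out = solution_alt relation
instance (relation : List (List String)) (out : Int) : Decidable (Spec_solution relation out) := by unfold Spec_solution; infer_instance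

-- ===== CLAIM (what is proved, stated in full; the proofs are below) =====
def Claim_equal_solution : Prop := ∀ (relation : List (List String)), Dom_solution relation → Pre_solution relation → Spec_solution relation (solution relation)


-- ===== LEMMAS AND PROOFS =====

-- `m ⊆ c` as both programs test it (every member of m occurs in c)
def pvSub (m c : List Int) : Bool := m.all (fun x => c.contains x)

-- B's uniqueness test, the canonical form both ports' tests are reduced to
def pvU (relation : List (List String)) (c : List Int) : Bool :=
  PySem.Set.len (PySem.Set.ofList (relation.map (fun row =>
    PySem.Str.join "" (c.map (fun i => PySem.List.pyGetD row i ""))))) == (relation.length : Int)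

-- the candidate list both programs enumerate
def pvCand (r : Int) : List (List Int) :=
  (PySem.List.pyRange 1 (r + 1) 1).flatMap
    (fun i => PySem.List.combinations (PySem.List.pyRange 0 r 1) i.toNat)

-- one-pass selection keeping only elements with no already-KEPT subset (B's pass)
def pvKeep (kept : List (List Int)) : List (List Int) → List (List Int)
  | [] => kept
  | c :: rest =>
    if kept.any (fun m => pvSub m c) then pvKeep kept rest
    else pvKeep (kept ++ [c]) rest

-- one-pass selection keeping only elements with no EARLIER subset (A's survivors)
def pvAll (seen kept : List (List Int)) : List (List Int) → List (List Int)
  | [] => kept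
  | c :: rest =>
    if seen.any (fun m => pvSub m c) then pvAll (seen ++ [c]) kept rest
    else pvAll (seen ++ [c]) (kept ++ [c]) rest

theorem pvSub_mem {m c : List Int} : pvSub m c = true ↔ ∀ x ∈ m, x ∈ c := by
  simp [pvSub, List.all_eq_true, List.contains_iff_mem]

theorem pvSub_refl (c : List Int) : pvSub c c = true := pvSub_mem.mpr (fun _ hx => hx)

theorem pvSub_trans {a b c : List Int} (h1 : pvSub a b = true) (h2 : pvSub b c = true) :
    pvSub a c = true :=
  pvSub_mem.mpr (fun x hx => pvSub_mem.mp h2 _ (pvSub_mem.mp h1 _ hx))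

theorem foldl_foldl_flatMap {A B C : Type} (g : A → List B) (f : C → B → C)
    (l : List A) (init : C) :
    l.foldl (fun st i => (g i).foldl f st) init = (l.flatMap g).foldl f init := by
  induction l generalizing init with
  | nil => rfl
  | cons x xs ih => simp [List.flatMap_cons, List.foldl_append, ih]

theorem intercalate_nil_char (l : List (List Char)) : List.intercalate [] l = l.flatten := by
  induction l with
  | nil => rfl
  | cons x xs ih =>
    cases xs with
    | nil => simp [List.intercalate]
    | cons y ys =>
      simp only [List.intercalate, List.intersperse] at ih ⊢
      simp_all [List.flatten]

theorem foldl_append_toList (parts : List String) (acc : String) :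
    (parts.foldl (fun t s => t ++ s) acc).toList = acc.toList ++ (parts.map String.toList).flatten := by
  induction parts generalizing acc with
  | nil => simp
  | cons p ps ih => simp [ih, String.toList_append]

theorem proj_eq (row : List String) (c : List Int) :
    c.foldl (fun temp i => temp ++ PySem.List.pyGetD row i "") "" =
      PySem.Str.join "" (c.map (fun i => PySem.List.pyGetD row i "")) := by
  have h1 : (c.foldl (fun temp i => temp ++ PySem.List.pyGetD row i "") "").toList
      = (PySem.Str.join "" (c.map (fun i => PySem.List.pyGetD row i ""))).toList := by
    have := foldl_append_toList (c.map (fun i => PySem.List.pyGetD row i "")) ""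
    rw [List.foldl_map] at this
    rw [this]
    simp [PySem.Str.join, PySem.Chars.join, intercalate_nil_char, List.map_map]
  calc c.foldl (fun temp i => temp ++ PySem.List.pyGetD row i "") ""
      = String.ofList (c.foldl (fun temp i => temp ++ PySem.List.pyGetD row i "") "").toList := by
        rw [String.ofList_toList]
    _ = _ := by rw [h1, String.ofList_toList]

theorem validA_eq (relation : List (List String)) (c : List Int) :
    (PySem.Set.len (relation.foldl (fun valid row =>
        PySem.Set.add valid (c.foldl (fun temp i => temp ++ PySem.List.pyGetD row i "") ""))
        PySem.Set.empty) == (relation.length : Int)) = pvU relation c := by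
  unfold pvU
  rw [← PySem.Set.update_map_eq_foldl_add, PySem.Set.update_empty]
  simp only [proj_eq]

theorem foldl_discard_filter (p : List Int → Bool) (L : List (List Int)) (s : PySem.Set (List Int)) :
    L.foldl (fun s m => if p m then PySem.Set.discard s m else s) s =
      s.filter (fun c => !(L.any (fun m => p m && (m == c)))) := by
  induction L generalizing s with
  | nil => simp
  | cons m L ih =>
    simp only [List.foldl_cons, List.any_cons]
    rw [ih]
    by_cases hp : p m = true
    · simp only [hp, if_true, PySem.Set.discard, List.filter_filter]
      apply List.filter_congr
      intro c _
      by_cases hmc : c = m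
      · subst hmc; simp
      · have h2 : (m == c) = false := by simp [beq_iff_eq]; exact fun h => hmc h.symm
        have h3 : (c == m) = false := by simp [beq_iff_eq]; exact hmc
        simp [h2, h3]
    · simp only [Bool.not_eq_true] at hp
      simp [hp]

theorem cand_mem_pairwise {r : Int} {c : List Int} (hc : c ∈ pvCand r) :
    c.Pairwise (· < ·) := by
  unfold pvCand at hc
  obtain ⟨i, -, hci⟩ := List.mem_flatMap.mp hc
  exact List.Pairwise.sublist ((PySem.List.mem_combinations_iff _ _ _).mp hci).1
    (PySem.List.pairwise_lt_pyRange_one 0 r)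

theorem nodup_combinations {A : Type} [DecidableEq A] (xs : List A) (k : Nat) (h : xs.Nodup) :
    (PySem.List.combinations xs k).Nodup := by
  induction xs generalizing k with
  | nil => cases k <;> simp [PySem.List.combinations_zero, PySem.List.combinations_nil_succ]
  | cons x xs ih =>
    cases k with
    | zero => simp [PySem.List.combinations_zero]
    | succ k =>
      rw [PySem.List.combinations_cons_succ]
      have hx : x ∉ xs := (List.nodup_cons.mp h).1
      have hxs : xs.Nodup := (List.nodup_cons.mp h).2
      refine List.Nodup.append ?_ (ih _ hxs) ?_
      · exact (ih k hxs).map (fun a b hab => by injection hab)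
      · intro a ha hb
        obtain ⟨c0, -, rfl⟩ := List.mem_map.mp ha
        have hsub := PySem.List.sublist_of_mem_combinations hb
        exact hx (hsub.subset (by simp))

-- a subset of a list, without duplicates, is no longer than it

theorem pvSub_length {a b : List Int} (hb : b.Nodup) (h : pvSub b a = true) :
    b.length ≤ a.length :=
  (hb.subperm (fun x hx => pvSub_mem.mp h x hx)).length_le

-- equal-length strictly sorted lists related by pvSub are equal

theorem pvSub_eq_of_sorted {a b : List Int} (ha : a.Pairwise (· < ·)) (hb : b.Pairwise (· < ·))
    (hlen : b.length = a.length) (h : pvSub b a = true) : a = b := by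
  have hbn : b.Nodup := hb.imp (fun hab => ne_of_lt hab)
  have hperm : b.Perm a :=
    (hbn.subperm (fun x hx => pvSub_mem.mp h x hx)).perm_of_length_le (by omega)
  exact (List.eq_of_perm_of_sorted (le := (· ≤ ·))
    (fun a b _ _ h1 h2 => le_antisymm h1 h2)
    (ha.imp le_of_lt) (hb.imp le_of_lt) hperm.symm)

theorem cand_pairwise (r : Int) :
    (pvCand r).Pairwise (fun a b => a ≠ b ∧ pvSub b a = false) := by
  unfold pvCand
  rw [List.pairwise_flatMap]
  constructor
  · intro i _
    have hnd : (PySem.List.combinations (PySem.List.pyRange 0 r 1) i.toNat).Nodup :=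
      nodup_combinations _ _ ((PySem.List.pairwise_lt_pyRange_one 0 r).imp ne_of_lt)
    refine hnd.imp_of_mem ?_
    intro a b ha hb hne
    refine ⟨hne, ?_⟩
    by_contra hsub
    simp only [Bool.not_eq_false] at hsub
    have hpa : a.Pairwise (· < ·) :=
      List.Pairwise.sublist ((PySem.List.mem_combinations_iff _ _ _).mp ha).1 (PySem.List.pairwise_lt_pyRange_one 0 r)
    have hpb : b.Pairwise (· < ·) :=
      List.Pairwise.sublist ((PySem.List.mem_combinations_iff _ _ _).mp hb).1 (PySem.List.pairwise_lt_pyRange_one 0 r)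
    have hla := PySem.List.length_of_mem_combinations ha
    have hlb := PySem.List.length_of_mem_combinations hb
    exact hne (pvSub_eq_of_sorted hpa hpb (by omega) hsub)
  · refine (PySem.List.pairwise_lt_pyRange_one 1 (r+1)).imp_of_mem ?_
    intro i j hi hj hij
    intro x hx y hy
    have hlx := PySem.List.length_of_mem_combinations hx
    have hly := PySem.List.length_of_mem_combinations hy
    have hi1 : 1 ≤ i := (PySem.List.mem_pyRange_one.mp hi).1
    have hlt : i.toNat < j.toNat := by omega
    have hyn : y.Nodup :=
      (List.Pairwise.sublist ((PySem.List.mem_combinations_iff _ _ _).mp hy).1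
        (PySem.List.pairwise_lt_pyRange_one 0 r)).imp ne_of_lt
    constructor
    · intro heq; subst heq; omega
    · by_contra hsub
      simp only [Bool.not_eq_false] at hsub
      have := pvSub_length hyn hsub
      omega

theorem condA_eq_pvSub (mi mj : List Int) (h : mi.Nodup) :
    (((mi.length : Int)) ==
        PySem.Set.len (PySem.Set.inter (PySem.Set.ofList mi) (PySem.Set.ofList mj)))
      = pvSub mi mj := by
  rw [PySem.Set.ofList_eq_self_of_nodup mi h]
  have hq : ∀ x : Int, (PySem.Set.ofList mj).contains x = mj.contains x := by
    intro x
    simp only [PySem.Set.contains_eq_listContains]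
    by_cases hx : x ∈ mj
    · simp [List.contains_iff_mem, hx, PySem.Set.mem_ofList]
    · simp [List.contains_iff_mem, hx, PySem.Set.mem_ofList]
  have : PySem.Set.inter mi (PySem.Set.ofList mj) = mi.filter (fun x => mj.contains x) := by
    show List.filter _ mi = _
    exact List.filter_congr (fun x _ => hq x)
  rw [this]
  show ((mi.length : Int) == ((mi.filter (fun x => mj.contains x)).length : Int)) = _
  by_cases hall : pvSub mi mj = true
  · have : mi.filter (fun x => mj.contains x) = mi :=
      List.filter_eq_self.mpr (fun x hx => (List.contains_iff_mem).mpr (pvSub_mem.mp hall x hx))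
    rw [this, hall]; simp
  · have hlt : (mi.filter (fun x => mj.contains x)).length < mi.length := by
      apply List.length_filter_lt_length_iff_exists.mpr
      simp only [pvSub, List.all_eq_true, not_forall] at hall
      obtain ⟨x, hx, hnx⟩ := hall
      exact ⟨x, hx, by simpa using hnx⟩
    have h1 : pvSub mi mj = false := Bool.not_eq_true _ ▸ (by simpa using hall)
    rw [h1]
    have : mi.length ≠ (List.filter (fun x => mj.contains x) mi).length := by omega
    simpa using this

theorem drop_any_eq (mini : List (List Int)) (hnd : mini.Nodup)
    (hQ : mini.Pairwise (fun a b => pvSub b a = false))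
    (k : Nat) (hk : k < mini.length) (c : List Int) (hc : c ∈ mini) :
    ((mini.drop (k+1)).any (fun m => pvSub mini[k] m && (m == c)))
      = (pvSub mini[k] c && !(mini[k] == c)) := by
  have hdropk : mini.drop k = mini[k] :: mini.drop (k+1) := List.drop_eq_getElem_cons hk
  have hndk : mini[k] ∉ mini.drop (k+1) := by
    have h1 : (mini.drop k).Nodup := hnd.sublist (List.drop_sublist k mini)
    rw [hdropk] at h1
    exact (List.nodup_cons.mp h1).1
  rw [Bool.eq_iff_iff]
  simp only [List.any_eq_true, Bool.and_eq_true, beq_iff_eq, Bool.not_eq_eq_eq_not,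
    Bool.not_true, beq_eq_false_iff_ne, ne_eq]
  constructor
  · rintro ⟨m, hm, hsub, rfl⟩
    exact ⟨hsub, fun he => hndk (he ▸ hm)⟩
  · rintro ⟨hsub, hne⟩
    refine ⟨c, ?_, hsub, rfl⟩
    have hsplit : c ∈ mini.take (k+1) ++ mini.drop (k+1) := by
      rw [List.take_append_drop]; exact hc
    rcases List.mem_append.mp hsplit with htk | hdk
    · exfalso
      have htake : mini.take (k+1) = mini.take k ++ [mini[k]] := by
        rw [← List.take_concat_get hk, List.concat_eq_append]
      have hpw : (mini.take (k+1)).Pairwise (fun a b => pvSub b a = false) :=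
        hQ.sublist (List.take_sublist _ _)
      rw [htake] at hpw htk
      rcases List.mem_append.mp htk with h1 | h1
      · have := (List.pairwise_append.mp hpw).2.2 c h1 mini[k] (by simp)
        rw [hsub] at this; cases this
      · exact hne (List.mem_singleton.mp h1).symm
    · exact hdk

theorem phase2_aux (mini : List (List Int)) (hnd : mini.Nodup)
    (hQ : mini.Pairwise (fun a b => pvSub b a = false))
    (hel : ∀ c ∈ mini, c.Nodup) :
    ∀ (k : Nat) (P : List Int → Bool), k ≤ mini.length →
    (PySem.List.pyRange (k : Int) (mini.length : Int) 1).foldl (fun ans i =>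
      (PySem.List.pyRange (i + 1) (mini.length : Int) 1).foldl (fun ans j =>
        if (((PySem.List.pyGetD mini i []).length : Int) ==
            PySem.Set.len (PySem.Set.inter (PySem.Set.ofList (PySem.List.pyGetD mini i []))
                                           (PySem.Set.ofList (PySem.List.pyGetD mini j [])))) then
          PySem.Set.discard ans (PySem.List.pyGetD mini j [])
        else ans) ans) (mini.filter P) =
      mini.filter (fun c => P c && !((mini.drop k).any (fun m => pvSub m c && !(m == c)))) := by
  intro k P hk
  induction hn : mini.length - k generalizing k P with
  | zero =>
    have hk' : k = mini.length := by omega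
    subst hk'
    rw [PySem.List.pyRange_one_eq_nil (le_refl _)]
    simp [List.drop_length]
  | succ n ih =>
    have hklt : k < mini.length := by omega
    rw [PySem.List.pyRange_one_cons (show (k:Int) < (mini.length:Int) by exact_mod_cast hklt)]
    simp only [List.foldl_cons]
    rw [PySem.List.foldl_pyRange_pyGetD' mini []
      (fun ans mj =>
        if (((PySem.List.pyGetD mini (k : Int) []).length : Int) ==
            PySem.Set.len (PySem.Set.inter (PySem.Set.ofList (PySem.List.pyGetD mini (k : Int) []))
                                           (PySem.Set.ofList mj))) then
          PySem.Set.discard ans mj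
        else ans)
      (mini.filter P) (by positivity)]
    have hgk : PySem.List.pyGetD mini (k : Int) [] = mini[k] := by
      rw [PySem.List.pyGetD_natCast, List.getD_eq_getElem _ _ hklt]
    have hcast : ((k : Int) + 1).toNat = k + 1 := by omega
    rw [hgk, hcast]
    rw [foldl_discard_filter
      (fun m => (((mini[k] : List Int).length : Int) ==
        PySem.Set.len (PySem.Set.inter (PySem.Set.ofList mini[k]) (PySem.Set.ofList m))))]
    rw [List.filter_filter]
    have hstep : (mini.filter (fun c =>
        (!((mini.drop (k+1)).any (fun m =>
          (((mini[k] : List Int).length : Int) ==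
            PySem.Set.len (PySem.Set.inter (PySem.Set.ofList mini[k]) (PySem.Set.ofList m)))
            && (m == c)))) && P c)) =
        mini.filter (fun c => (!(pvSub mini[k] c && !(mini[k] == c))) && P c) := by
      apply List.filter_congr
      intro c hc
      have hcond : ∀ m : List Int,
          (((mini[k] : List Int).length : Int) ==
            PySem.Set.len (PySem.Set.inter (PySem.Set.ofList mini[k]) (PySem.Set.ofList m)))
          = pvSub mini[k] m := fun m => condA_eq_pvSub _ m (hel _ (mini.getElem_mem hklt))
      simp only [hcond]
      rw [drop_any_eq mini hnd hQ k hklt c hc]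
    rw [hstep]
    have hcast2 : ((k : Int) + 1) = (((k+1 : Nat)) : Int) := by push_cast; ring
    rw [hcast2, ih (k+1) (fun c => (!(pvSub mini[k] c && !(mini[k] == c))) && P c)
      (by omega) (by omega)]
    apply List.filter_congr
    intro c _
    rw [List.drop_eq_getElem_cons hklt, List.any_cons]
    cases hP : P c <;> cases hS : (pvSub mini[k] c && !(mini[k] == c)) <;>
      cases hA : ((mini.drop (k+1)).any (fun m => pvSub m c && !(m == c))) <;>
      simp [hP, hS, hA]

theorem filter_eq_pvAll (L : List (List Int)) :
    ∀ (seen kept : List (List Int)), (seen ++ L).Nodup →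
      (seen ++ L).Pairwise (fun a b => pvSub b a = false) →
      pvAll seen kept L =
        kept ++ L.filter (fun c => !((seen ++ L).any (fun m => pvSub m c && !(m == c)))) := by
  induction L with
  | nil => intro seen kept _ _; simp [pvAll]
  | cons c rest ih =>
    intro seen kept hnd hQ
    have hcnotseen : c ∉ seen := by
      have := List.disjoint_of_nodup_append hnd
      exact fun hcs => this hcs (by simp)
    have hhead : ((seen ++ c :: rest).any (fun m => pvSub m c && !(m == c)))
        = seen.any (fun m => pvSub m c) := by
      rw [Bool.eq_iff_iff]
      simp only [List.any_eq_true, Bool.and_eq_true, Bool.not_eq_eq_eq_not, Bool.not_true,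
        beq_eq_false_iff_ne, ne_eq, List.mem_append, List.mem_cons]
      constructor
      · rintro ⟨m, hm, hsub, hne⟩
        rcases hm with hm | hm | hm
        · exact ⟨m, hm, hsub⟩
        · exact (hne hm).elim
        · exfalso
          have hpw := (List.pairwise_append.mp hQ).2.1
          have := (List.pairwise_cons.mp hpw).1 m hm
          rw [hsub] at this; cases this
      · rintro ⟨m, hm, hsub⟩
        exact ⟨m, Or.inl hm, hsub, fun he => hcnotseen (he ▸ hm)⟩
    have hassoc : seen ++ c :: rest = (seen ++ [c]) ++ rest := by simp
    show (if seen.any (fun m => pvSub m c) then pvAll (seen ++ [c]) kept rest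
      else pvAll (seen ++ [c]) (kept ++ [c]) rest) = _
    rw [List.filter_cons]
    by_cases hs : seen.any (fun m => pvSub m c) = true
    · rw [if_pos hs]
      rw [ih (seen ++ [c]) kept (by rw [← hassoc]; exact hnd) (by rw [← hassoc]; exact hQ)]
      rw [← hassoc]
      have hc : (!((seen ++ c :: rest).any (fun m => pvSub m c && !(m == c)))) = false := by
        rw [hhead, hs]; rfl
      rw [hc]
      simp only [Bool.false_eq_true, if_false]
    · have hs' : seen.any (fun m => pvSub m c) = false := by simpa using hs
      rw [if_neg hs]
      rw [ih (seen ++ [c]) (kept ++ [c]) (by rw [← hassoc]; exact hnd) (by rw [← hassoc]; exact hQ)]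
      rw [← hassoc]
      have hc : (!((seen ++ c :: rest).any (fun m => pvSub m c && !(m == c)))) = true := by
        rw [hhead, hs']; rfl
      rw [hc]
      simp only [if_true, List.append_assoc, List.singleton_append]

theorem pvAll_eq_pvKeep (L : List (List Int)) :
    ∀ (seen kept : List (List Int)), (∀ k ∈ kept, k ∈ seen) →
      (∀ m ∈ seen, ∃ k ∈ kept, pvSub k m = true) →
      pvAll seen kept L = pvKeep kept L := by
  induction L with
  | nil => intro seen kept _ _; rfl
  | cons c rest ih =>
    intro seen kept h1 h2
    have hcond : seen.any (fun m => pvSub m c) = kept.any (fun m => pvSub m c) := by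
      rw [Bool.eq_iff_iff]
      simp only [List.any_eq_true]
      constructor
      · rintro ⟨m, hm, hsub⟩
        obtain ⟨k, hk, hks⟩ := h2 m hm
        exact ⟨k, hk, pvSub_trans hks hsub⟩
      · rintro ⟨k, hk, hsub⟩
        exact ⟨k, h1 k hk, hsub⟩
    show (if seen.any (fun m => pvSub m c) then pvAll (seen ++ [c]) kept rest
      else pvAll (seen ++ [c]) (kept ++ [c]) rest) =
      (if kept.any (fun m => pvSub m c) then pvKeep kept rest else pvKeep (kept ++ [c]) rest)
    rw [hcond]
    by_cases hk : kept.any (fun m => pvSub m c) = true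
    · rw [if_pos hk, if_pos hk]
      apply ih
      · intro x hx; exact List.mem_append_left _ (h1 x hx)
      · intro m hm
        rcases List.mem_append.mp hm with hm | hm
        · exact h2 m hm
        · obtain ⟨k, hks, hsub⟩ := List.any_eq_true.mp hk
          exact ⟨k, hks, (List.mem_singleton.mp hm) ▸ hsub⟩
    · rw [if_neg hk, if_neg hk]
      apply ih
      · intro x hx
        rcases List.mem_append.mp hx with hx | hx
        · exact List.mem_append_left _ (h1 x hx)
        · exact List.mem_append_right _ hx
      · intro m hm
        rcases List.mem_append.mp hm with hm | hm
        · obtain ⟨k, hks, hsub⟩ := h2 m hm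
          exact ⟨k, List.mem_append_left _ hks, hsub⟩
        · exact ⟨c, List.mem_append_right _ (by simp), (List.mem_singleton.mp hm) ▸ pvSub_refl c⟩

theorem bfold_eq_pvKeep (relation : List (List String)) (L : List (List Int)) :
    ∀ kept : List (List Int),
      L.foldl (fun minimal cols =>
        if minimal.any (fun m => m.all (fun x => cols.contains x)) then minimal
        else if pvU relation cols then minimal ++ [cols] else minimal) kept =
      pvKeep kept (L.filter (pvU relation)) := by
  induction L with
  | nil => intro kept; rfl
  | cons c rest ih =>
    intro kept
    rw [List.foldl_cons]
    by_cases hU : pvU relation c = true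
    · have hf : (c :: rest).filter (pvU relation) = c :: rest.filter (pvU relation) := by
        simp [List.filter_cons, hU]
      rw [hf]
      by_cases hA : kept.any (fun m => pvSub m c) = true
      · have hfc : (if kept.any (fun m => m.all (fun x => c.contains x)) then kept
            else if pvU relation c then kept ++ [c] else kept) = kept := by
          show (if kept.any (fun m => pvSub m c) then kept
            else if pvU relation c then kept ++ [c] else kept) = kept
          rw [if_pos hA]
        rw [hfc, ih kept]
        show _ = if kept.any (fun m => pvSub m c) then pvKeep kept (rest.filter (pvU relation))
          else pvKeep (kept ++ [c]) (rest.filter (pvU relation))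
        rw [if_pos hA]
      · have hfc : (if kept.any (fun m => m.all (fun x => c.contains x)) then kept
            else if pvU relation c then kept ++ [c] else kept) = kept ++ [c] := by
          show (if kept.any (fun m => pvSub m c) then kept
            else if pvU relation c then kept ++ [c] else kept) = kept ++ [c]
          rw [if_neg (by simp [hA]), if_pos hU]
        rw [hfc, ih (kept ++ [c])]
        show _ = if kept.any (fun m => pvSub m c) then pvKeep kept (rest.filter (pvU relation))
          else pvKeep (kept ++ [c]) (rest.filter (pvU relation))
        rw [if_neg (by simp [hA])]
    · have hU' : pvU relation c = false := by simpa using hU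
      have hf : (c :: rest).filter (pvU relation) = rest.filter (pvU relation) := by
        simp [List.filter_cons, hU']
      rw [hf]
      have hfc : (if kept.any (fun m => m.all (fun x => c.contains x)) then kept
          else if pvU relation c then kept ++ [c] else kept) = kept := by
        rw [hU']; split <;> simp
      rw [hfc]
      exact ih kept


theorem phase2_eq (mini : List (List Int)) (hnd : mini.Nodup)
    (hQ : mini.Pairwise (fun a b => pvSub b a = false))
    (hel : ∀ c ∈ mini, c.Nodup) :
    (PySem.List.pyRange 0 (mini.length : Int) 1).foldl (fun ans i =>
      (PySem.List.pyRange (i + 1) (mini.length : Int) 1).foldl (fun ans j =>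
        if (((PySem.List.pyGetD mini i []).length : Int) ==
            PySem.Set.len (PySem.Set.inter (PySem.Set.ofList (PySem.List.pyGetD mini i []))
                                           (PySem.Set.ofList (PySem.List.pyGetD mini j [])))) then
          PySem.Set.discard ans (PySem.List.pyGetD mini j [])
        else ans) ans) mini =
      mini.filter (fun c => !(mini.any (fun m => pvSub m c && !(m == c)))) := by
  have h0 := phase2_aux mini hnd hQ hel 0 (fun _ => true) (by omega)
  simpa using h0

theorem solutionA_eq (relation : List (List String)) :
    solution relation =
      ((pvKeep [] ((pvCand ((PySem.List.pyGetD relation 0 []).length : Int)).filter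
        (pvU relation))).length : Int) := by
  unfold solution
  dsimp only
  rw [PySem.List.foldl_append_eq_flatMap, List.nil_append]
  simp only [validA_eq]
  rw [PySem.List.foldl_append_if, List.nil_append, List.map_id']
  set r : Int := ((PySem.List.pyGetD relation 0 []).length : Int) with hrdef
  have hcand : (PySem.List.pyRange 1 (r + 1) 1).flatMap
      (fun i => PySem.List.combinations (PySem.List.pyRange 0 r 1) i.toNat) = pvCand r := rfl
  rw [hcand]
  set mini : List (List Int) := (pvCand r).filter (pvU relation) with hmini
  have hQQ : mini.Pairwise (fun a b => a ≠ b ∧ pvSub b a = false) :=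
    List.Pairwise.sublist List.filter_sublist (cand_pairwise r)
  have hnd : mini.Nodup := hQQ.imp (fun h => h.1)
  have hQ : mini.Pairwise (fun a b => pvSub b a = false) := hQQ.imp (fun h => h.2)
  have hel : ∀ c ∈ mini, c.Nodup := fun c hc =>
    (cand_mem_pairwise (List.mem_of_mem_filter hc)).imp ne_of_lt
  rw [PySem.Set.ofList_eq_self_of_nodup _ hnd]
  rw [phase2_eq mini hnd hQ hel]
  have hA : pvAll [] [] mini = mini.filter (fun c => !(mini.any (fun m => pvSub m c && !(m == c)))) := by
    have := filter_eq_pvAll mini [] [] (by simpa using hnd) (by simpa using hQ)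
    simpa using this
  have hK : pvAll [] [] mini = pvKeep [] mini :=
    pvAll_eq_pvKeep mini [] [] (by simp) (by simp)
  rw [← hA, hK]
  rfl

theorem solutionB_eq (relation : List (List String)) :
    solution_alt relation =
      ((pvKeep [] ((pvCand ((PySem.List.pyGetD relation 0 []).length : Int)).filter
        (pvU relation))).length : Int) := by
  have h1 := foldl_foldl_flatMap
    (fun i : Int => PySem.List.combinations
      (PySem.List.pyRange 0 ((PySem.List.pyGetD relation 0 []).length : Int) 1) i.toNat)
    (fun (minimal : List (List Int)) (cols : List Int) =>
      if minimal.any (fun m => m.all (fun x => cols.contains x)) then minimal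
      else if pvU relation cols then minimal ++ [cols] else minimal)
    (PySem.List.pyRange 1 (((PySem.List.pyGetD relation 0 []).length : Int) + 1) 1) []
  exact congrArg (fun l : List (List Int) => (l.length : Int))
    (h1.trans (bfold_eq_pvKeep relation _ []))

-- ===== VERDICT (by name: the statement is the Claim_ definition above) =====
theorem solution_spec : Claim_equal_solution := by
  intro relation _ _
  unfold Spec_solution
  rw [solutionA_eq, solutionB_eq]
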